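-- pv_equiv track=rewrite | github.com/mhendzel2/SPT2025B | changepoint_detection.py | _create_motion_segments
-- ===== SOURCE A (Python) =====
-- from typing import Dict, List, Tuple, Optional, Any
--
-- def _create_motion_segments(changepoints: List[Dict],
--                           track_length: int,
--                           min_segment_length: int) -> List[Dict]:
--     """Create motion segments between changepoints."""
--     segments = []
--
--     if not changepoints:
--         # Single segment for entire track
--         if track_length >= min_segment_length:
--             segments.append({'start': 0, 'end': track_length})
--     else:
--         # Sort changepoints
--         sorted_cps = sorted(changepoints, key=lambda x: x['position'])
--
--         # First segment
--         if sorted_cps[0]['position'] >= min_segment_length: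
--             segments.append({'start': 0, 'end': sorted_cps[0]['position']})
--
--         # Middle segments
--         for i in range(len(sorted_cps) - 1):
--             start = sorted_cps[i]['position']
--             end = sorted_cps[i + 1]['position']
--
--             if end - start >= min_segment_length:
--                 segments.append({'start': start, 'end': end})
--
--         # Last segment
--         last_start = sorted_cps[-1]['position']
--         if track_length - last_start >= min_segment_length:
--             segments.append({'start': last_start, 'end': track_length})
--
--     return segments
-- ===== SOURCE B (Python) =====
-- def _create_motion_segments(changepoints, track_length, min_segment_length):
--     def walk(prev, positions):
--         if not positions:
--             return ([{'start': prev, 'end': track_length}]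
--                     if track_length - prev >= min_segment_length else [])
--         head, rest = positions[0], positions[1:]
--         seg = ([{'start': prev, 'end': head}]
--                if head - prev >= min_segment_length else [])
--         return seg + walk(head, rest)
--     return walk(0, sorted(cp['position'] for cp in changepoints))
-- ===== Notes on version B (the rewrite author's own statement) =====
-- stated objective: alternative
-- what changed: B extracts and sorts the positions once, then a single recursive walk carries the previous boundary and emits each qualifying segment, ending with the track_length segment; A's empty-list branch, first-segment branch, indexed middle loop and last-segment branch all disappear.
import Mathlib
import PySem

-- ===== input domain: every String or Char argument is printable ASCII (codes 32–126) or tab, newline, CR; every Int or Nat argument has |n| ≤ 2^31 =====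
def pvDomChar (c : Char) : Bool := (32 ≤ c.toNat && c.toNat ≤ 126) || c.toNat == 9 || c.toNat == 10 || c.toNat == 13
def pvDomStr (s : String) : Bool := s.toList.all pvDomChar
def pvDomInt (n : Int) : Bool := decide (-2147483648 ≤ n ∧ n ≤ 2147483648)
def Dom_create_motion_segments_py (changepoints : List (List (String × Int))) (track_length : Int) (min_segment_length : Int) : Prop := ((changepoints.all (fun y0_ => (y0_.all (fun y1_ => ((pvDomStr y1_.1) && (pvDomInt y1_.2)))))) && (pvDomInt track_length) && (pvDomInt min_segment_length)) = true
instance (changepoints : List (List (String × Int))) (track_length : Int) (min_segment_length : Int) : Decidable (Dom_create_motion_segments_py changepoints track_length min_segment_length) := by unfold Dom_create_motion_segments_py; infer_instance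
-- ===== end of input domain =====

-- B sorts the extracted positions once and a single recursive walk carrying the previous boundary emits the segments (objective: alternative decomposition).

-- ===== PORT A =====
-- cp['position'] : first-match lookup in the association list; KeyError (lookup = none) is excluded by Pre_, .getD 0 is never reached there
def pvPosA (cp : List (String × Int)) : Int := (cp.lookup "position").getD 0

def create_motion_segments_py (changepoints : List (List (String × Int))) (track_length : Int) (min_segment_length : Int) : List (List (String × Int)) :=
  if changepoints = [] then
    if min_segment_length ≤ track_length then [[("start", (0 : Int)), ("end", track_length)]] else []
  else
    let sorted_cps := PySem.List.sorted changepoints (fun x => pvPosA x)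
    -- first segment
    let segs1 :=
      if min_segment_length ≤ pvPosA ((PySem.List.pyGet? sorted_cps 0).getD []) then
        [[("start", (0 : Int)), ("end", pvPosA ((PySem.List.pyGet? sorted_cps 0).getD []))]]
      else []
    -- middle segments
    let segs2 :=
      (PySem.List.pyRange 0 ((sorted_cps.length : Int) - 1) 1).foldl (fun acc i =>
        let start := pvPosA ((PySem.List.pyGet? sorted_cps i).getD [])
        let e := pvPosA ((PySem.List.pyGet? sorted_cps (i + 1)).getD [])
        if min_segment_length ≤ e - start then acc ++ [[("start", start), ("end", e)]] else acc) segs1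
    -- last segment
    let last_start := pvPosA ((PySem.List.pyGet? sorted_cps (-1)).getD [])
    if min_segment_length ≤ track_length - last_start then segs2 ++ [[("start", last_start), ("end", track_length)]] else segs2

-- ===== PORT B =====
def pvPosB (cp : List (String × Int)) : Int := (cp.lookup "position").getD 0

-- the inner recursive 'walk(prev, positions)' of Source B (closes over track_length / min_segment_length)
def pvWalk (track_length min_segment_length : Int) : Int → List Int → List (List (String × Int))
  | prev, [] =>
      if min_segment_length ≤ track_length - prev then [[("start", prev), ("end", track_length)]] else []
  | prev, head :: rest =>
      (if min_segment_length ≤ head - prev then [[("start", prev), ("end", head)]] else []) ++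
        pvWalk track_length min_segment_length head rest

def create_motion_segments_py_alt (changepoints : List (List (String × Int))) (track_length : Int) (min_segment_length : Int) : List (List (String × Int)) :=
  pvWalk track_length min_segment_length 0
    (PySem.List.sorted (changepoints.map pvPosB) (fun x => x))

-- ===== PRECONDITION & SPEC =====
-- Pre_ excludes exactly the inputs where some changepoint has no 'position' key, on which Python A raises KeyError.
def Pre_create_motion_segments_py (changepoints : List (List (String × Int))) (track_length : Int) (min_segment_length : Int) : Prop :=
  ∀ cp ∈ changepoints, (cp.lookup "position").isSome = true
instance (changepoints : List (List (String × Int))) (track_length : Int) (min_segment_length : Int) : Decidable (Pre_create_motion_segments_py changepoints track_length min_segment_length) := by unfold Pre_create_motion_segments_py; infer_instance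

def pvWitness_create_motion_segments_py : (List (List (String × Int))) × Int × Int := ([[("position", 4)], [("position", 1)]], 10, 2)

def Spec_create_motion_segments_py (changepoints : List (List (String × Int))) (track_length : Int) (min_segment_length : Int) (out : List (List (String × Int))) : Prop := out = create_motion_segments_py_alt changepoints track_length min_segment_length
instance (changepoints : List (List (String × Int))) (track_length : Int) (min_segment_length : Int) (out : List (List (String × Int))) : Decidable (Spec_create_motion_segments_py changepoints track_length min_segment_length out) := by unfold Spec_create_motion_segments_py; infer_instance

-- ===== CLAIM (what is proved, stated in full; the proofs are below) =====
def Claim_equal_create_motion_segments_py : Prop := ∀ (changepoints : List (List (String × Int))) (track_length : Int) (min_segment_length : Int), Dom_create_motion_segments_py changepoints track_length min_segment_length → Pre_create_motion_segments_py changepoints track_length min_segment_length → Spec_create_motion_segments_py changepoints track_length min_segment_length (create_motion_segments_py changepoints track_length min_segment_length)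

-- ===== LEMMAS AND PROOFS =====

-- adjacent pairs of q ++ [t], for nonempty q
lemma pv_zip_append_last (q : List Int) (t : Int) (hq : q ≠ []) :
    (q ++ [t]).zip ((q ++ [t]).drop 1) = q.zip (q.drop 1) ++ [(q.getLast hq, t)] := by
  induction q with
  | nil => exact absurd rfl hq
  | cons a q ih =>
    cases q with
    | nil => simp
    | cons b q =>
      have := ih (by simp)
      simp_all [List.getLast]

-- index-based adjacent pairs equal zip-based adjacent pairs
lemma pv_range_adj_zip (s : List Int) :
    (List.range (s.length - 1)).map (fun k => (s.getD k 0, s.getD (k + 1) 0)) = s.zip (s.drop 1) := by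
  induction s with
  | nil => simp
  | cons a s ih =>
    cases s with
    | nil => simp
    | cons b s =>
      have h := ih
      simp only [List.length_cons, Nat.add_sub_cancel] at h ⊢
      rw [List.range_succ_eq_map]
      simp only [List.map_cons, List.map_map]
      simp only [List.getD_cons_zero, List.getD_cons_succ]
      simp only [List.drop_succ_cons, List.drop_zero] at h ⊢
      have hfun : ((fun k => ((a :: b :: s).getD k 0, (b :: s).getD k 0)) ∘ Nat.succ)
          = (fun k => ((b :: s).getD k 0, (b :: s).getD (k + 1) 0)) := by
        funext k
        simp [Function.comp]
      rw [hfun, h]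
      rfl

-- pvPosA commutes with the default lookup of a mapped list (pvPosA [] = 0)
lemma pv_get_map_pos (s : List (List (String × Int))) (k : Nat) :
    pvPosA (s[k]?.getD []) = (s.map pvPosA)[k]?.getD 0 := by
  simp only [List.getElem?_map]
  cases s[k]? <;> simp [pvPosA]

-- the core identity for a nonempty sorted list: A's three stages = filtered adjacent pairs of 0 :: positions ++ [tl]
lemma pv_main (s : List (List (String × Int))) (tl msl : Int) (hne : s ≠ []) :
    (if msl ≤ pvPosA ((PySem.List.pyGet? s 0).getD []) then
        [[("start", (0 : Int)), ("end", pvPosA ((PySem.List.pyGet? s 0).getD []))]] else []) ++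
      ((List.range (s.length - 1)).filter
          (fun k => decide (msl ≤ pvPosA (s.getD (k + 1) []) - pvPosA (s.getD k [])))).map
        (fun k => [("start", pvPosA (s.getD k [])), ("end", pvPosA (s.getD (k + 1) []))]) ++
      (if msl ≤ tl - pvPosA ((PySem.List.pyGet? s (-1)).getD []) then
        [[("start", pvPosA ((PySem.List.pyGet? s (-1)).getD [])), ("end", tl)]] else []) =
    ((((0 : Int) :: (s.map pvPosA ++ [tl])).zip (s.map pvPosA ++ [tl])).filter
        (fun p => msl ≤ p.2 - p.1)).map (fun p => [("start", p.1), ("end", p.2)]) := by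
  obtain ⟨x, r, rfl⟩ := List.exists_cons_of_ne_nil hne
  set ps := (x :: r).map pvPosA with hps
  have hpsne : ps ≠ [] := by simp [hps]
  have hmid :
      ((List.range ((x :: r).length - 1)).filter
          (fun k => decide (msl ≤ pvPosA ((x :: r).getD (k + 1) []) - pvPosA ((x :: r).getD k [])))).map
        (fun k => [("start", pvPosA ((x :: r).getD k [])), ("end", pvPosA ((x :: r).getD (k + 1) []))]) =
      ((ps.zip (ps.drop 1)).filter (fun p => msl ≤ p.2 - p.1)).map
        (fun p => [("start", p.1), ("end", p.2)]) := by
    have hz := pv_range_adj_zip ps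
    have hlen : ps.length = (x :: r).length := by simp [hps]
    rw [hlen] at hz
    rw [← hz, List.filter_map, List.map_map]
    congr 1
    · funext k
      simp [Function.comp, List.getD, pv_get_map_pos, hps]
    · congr 1
      funext k
      simp [Function.comp, List.getD, pv_get_map_pos, hps]
  have hq : ps ++ [tl] = pvPosA x :: ((r.map pvPosA) ++ [tl]) := by simp [hps]
  have hzip : (((0 : Int) :: (ps ++ [tl])).zip (ps ++ [tl])) =
      (0, pvPosA x) :: (ps.zip (ps.drop 1) ++ [(ps.getLast hpsne, tl)]) := by
    conv_lhs => rw [hq]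
    rw [List.zip_cons_cons, ← hq]
    have : (ps ++ [tl]).drop 1 = (r.map pvPosA) ++ [tl] := by simp [hps]
    rw [show ((r.map pvPosA) ++ [tl] : List Int) = (ps ++ [tl]).drop 1 from this.symm,
      pv_zip_append_last ps tl hpsne]
  rw [hzip]
  have hlast : pvPosA ((PySem.List.pyGet? (x :: r) (-1)).getD []) = ps.getLast hpsne := by
    apply Option.some.inj
    calc some (pvPosA ((PySem.List.pyGet? (x :: r) (-1)).getD []))
        = Option.map pvPosA (PySem.List.pyGet? (x :: r) (-1)) := by
          rw [PySem.List.pyGet?_neg_one, List.getLast?_eq_some_getLast hne]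
          rfl
      _ = ps.getLast? := by
          rw [PySem.List.pyGet?_neg_one, ← List.getLast?_map]
      _ = some (ps.getLast hpsne) := List.getLast?_eq_some_getLast hpsne
  rw [PySem.List.pyGet?_zero_cons, hlast]
  simp only [Option.getD_some, List.filter_cons, List.filter_append]
  rw [hmid]
  simp only [sub_zero]
  split_ifs <;> simp_all <;> omega

-- B's recursive walk computes the filtered adjacent pairs of prev :: ps ++ [tl]
lemma pv_walk_zip (tl msl : Int) (ps : List Int) : ∀ prev : Int,
    pvWalk tl msl prev ps =
    (((prev :: (ps ++ [tl])).zip (ps ++ [tl])).filter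
        (fun p => msl ≤ p.2 - p.1)).map (fun p => [("start", p.1), ("end", p.2)]) := by
  induction ps with
  | nil =>
    intro prev
    simp only [pvWalk, List.nil_append, List.zip_cons_cons, List.zip_nil_right,
      List.filter_cons, List.filter_nil]
    split_ifs with h <;> simp_all <;> omega
  | cons h t ih =>
    intro prev
    simp only [pvWalk, List.cons_append, List.zip_cons_cons, List.filter_cons, ih h]
    split_ifs with hc <;> simp_all <;> omega

-- sorting the extracted positions = extracting the positions of the key-sorted dicts
lemma pv_sorted_positions (cps : List (List (String × Int))) :
    PySem.List.sorted (cps.map pvPosB) (fun x => x) =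
    (PySem.List.sorted cps (fun x => pvPosA x)).map pvPosA := by
  have hBA : pvPosB = pvPosA := rfl
  rw [hBA]
  exact PySem.List.sorted_id_eq_of_perm_of_pairwise _ _
    (List.Perm.map pvPosA (PySem.List.sorted_perm cps (fun x => pvPosA x) false))
    (PySem.List.sorted_map_key_pairwise cps (fun x => pvPosA x))

-- ===== VERDICT (by name: the statement is the Claim_ definition above) =====
theorem create_motion_segments_py_spec : Claim_equal_create_motion_segments_py := by
  intro cps tl msl _ hpre
  show create_motion_segments_py cps tl msl = create_motion_segments_py_alt cps tl msl
  unfold create_motion_segments_py create_motion_segments_py_alt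
  rw [pv_sorted_positions, pv_walk_zip]
  by_cases hc : cps = []
  · subst hc
    have h0 : PySem.List.sorted ([] : List (List (String × Int))) (fun x => pvPosA x) = [] := by
      rw [PySem.List.sorted_eq_nil_iff]
    rw [if_pos rfl, h0]
    by_cases h : msl ≤ tl <;> simp [h, List.zip_cons_cons, sub_zero]
  · simp only [if_neg hc]
    set s := PySem.List.sorted cps (fun x => pvPosA x) with hs
    have hne : s ≠ [] := by
      rw [hs, Ne, PySem.List.sorted_eq_nil_iff]
      exact hc
    have hfold : ∀ (init : List (List (String × Int))),
        (PySem.List.pyRange 0 ((s.length : Int) - 1) 1).foldl (fun acc i =>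
          let start := pvPosA ((PySem.List.pyGet? s i).getD [])
          let e := pvPosA ((PySem.List.pyGet? s (i + 1)).getD [])
          if msl ≤ e - start then acc ++ [[("start", start), ("end", e)]] else acc) init =
        init ++ ((List.range (s.length - 1)).filter
            (fun k => decide (msl ≤ pvPosA (s.getD (k + 1) []) - pvPosA (s.getD k [])))).map
          (fun k => [("start", pvPosA (s.getD k [])), ("end", pvPosA (s.getD (k + 1) []))]) := by
      intro init
      rw [PySem.List.pyRange_one, List.foldl_map]
      have hcast : ((s.length : Int) - 1 - 0).toNat = s.length - 1 := by omega
      rw [hcast]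
      have hbody : (fun (acc : List (List (String × Int))) (k : Nat) =>
          let start := pvPosA ((PySem.List.pyGet? s ((0 : Int) + (k : Int))).getD [])
          let e := pvPosA ((PySem.List.pyGet? s ((0 : Int) + (k : Int) + 1)).getD [])
          if msl ≤ e - start then acc ++ [[("start", start), ("end", e)]] else acc) =
          (fun acc k =>
            if (decide (msl ≤ pvPosA (s.getD (k + 1) []) - pvPosA (s.getD k []))) = true then
              acc ++ [(fun k => [("start", pvPosA (s.getD k [])), ("end", pvPosA (s.getD (k + 1) []))]) k]
            else acc) := by
        funext acc k
        have h2 : (0 : Int) + (k : Int) + 1 = (((k + 1 : Nat)) : Int) := by push_cast; omega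
        have h1 : (0 : Int) + (k : Int) = ((k : Nat) : Int) := by omega
        rw [h2, h1, PySem.List.pyGet?_natCast, PySem.List.pyGet?_natCast]
        simp [List.getD]
      rw [hbody, PySem.List.foldl_append_if]
    rw [hfold]
    have hmain := pv_main s tl msl hne
    rw [← hmain]
    split_ifs <;> simp
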